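-- pv_equiv track=rewrite | github.com/AyrtonCossuol/practices_signals_and_systems | Laboratorio_5/exercicio_1_c_ayrtoncossuol.py | cria_funcao
-- ===== SOURCE A (Python) =====
-- def cria_funcao(N, periodo):
--   x = []
--   cont_1 = 2
--   cont_2 = 0
--   for i in range(0, (periodo * N)):
--     if cont_1 == 4 and cont_2 == 0:
--       x.append(1)
--       cont_1 = 1
--       cont_2 = 1
--     elif cont_1 == 4 and cont_2 == 1:
--       x.append(-1)
--       cont_1 = 1
--       cont_2 = 0
--     else:
--       x.append(0)
--       cont_1 += 1
--
--   return x
-- ===== SOURCE B (Python) =====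
-- def cria_funcao(N, periodo):
--     n = periodo * N
--     if n <= 0:
--         return []
--     block = [0, 0, 1, 0, 0, 0, -1, 0]
--     return (block * ((n + 7) // 8))[:n]
-- ===== Notes on version B (the rewrite author's own statement) =====
-- stated objective: idiomatic
-- what changed: Replaces the two-counter state machine with the closed observation that the output is periodic: tile the fixed period-8 block [0,0,1,0,0,0,-1,0] and slice it to length periodo*N.
import Mathlib
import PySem

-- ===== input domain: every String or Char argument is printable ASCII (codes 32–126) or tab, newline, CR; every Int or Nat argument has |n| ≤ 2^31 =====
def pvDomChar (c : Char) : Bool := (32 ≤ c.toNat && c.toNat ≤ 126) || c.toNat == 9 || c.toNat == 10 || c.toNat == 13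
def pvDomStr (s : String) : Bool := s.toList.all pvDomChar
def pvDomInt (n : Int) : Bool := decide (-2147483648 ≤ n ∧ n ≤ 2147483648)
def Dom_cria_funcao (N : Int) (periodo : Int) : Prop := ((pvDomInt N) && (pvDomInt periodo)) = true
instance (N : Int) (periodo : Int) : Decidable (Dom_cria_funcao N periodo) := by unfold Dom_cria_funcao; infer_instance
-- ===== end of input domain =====

-- B replaces A's two-counter state machine by tiling the fixed period-8 block
-- [0,0,1,0,0,0,-1,0] and slicing to length periodo*N (idiomatic; same cost).

-- ===== PORT A =====
-- one loop step of A's for-body: state = (x, cont_1, cont_2)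
def criaStep (s : List Int × Int × Int) : List Int × Int × Int :=
  if s.2.1 = 4 ∧ s.2.2 = 0 then (s.1 ++ [1], 1, 1)
  else if s.2.1 = 4 ∧ s.2.2 = 1 then (s.1 ++ [-1], 1, 0)
  else (s.1 ++ [0], s.2.1 + 1, s.2.2)

def cria_funcao (N : Int) (periodo : Int) : List Int :=
  ((PySem.List.pyRange 0 (periodo * N) 1).foldl (fun s _ => criaStep s) ([], 2, 0)).1

-- ===== PORT B =====
def cria_funcao_alt (N : Int) (periodo : Int) : List Int :=
  let n := periodo * N
  if n ≤ 0 then []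
  else
    -- block * ((n+7)//8), then slice [:n] (n > 0 here, so the slice is List.take)
    (List.flatten (List.replicate (PySem.Int.floordiv (n + 7) 8).toNat
      ([0, 0, 1, 0, 0, 0, -1, 0] : List Int))).take n.toNat

-- ===== PRECONDITION & SPEC =====
def Spec_cria_funcao (N : Int) (periodo : Int) (out : List Int) : Prop := out = cria_funcao_alt N periodo
instance (N : Int) (periodo : Int) (out : List Int) : Decidable (Spec_cria_funcao N periodo out) := by unfold Spec_cria_funcao; infer_instance

-- ===== CLAIM (what is proved, stated in full; the proofs are below) =====
def Claim_equal_cria_funcao : Prop := ∀ (N : Int) (periodo : Int), Dom_cria_funcao N periodo → Spec_cria_funcao N periodo (cria_funcao N periodo)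

-- ===== LEMMAS AND PROOFS =====

-- the periodic sample both programs produce at index k
def pvG (k : Nat) : Int := if k % 8 = 2 then 1 else if k % 8 = 6 then -1 else 0

-- a fold whose function ignores the list element only depends on the length
theorem pvFoldlConst {α β : Type} (F : β → β) (l : List α) (s : β) :
    l.foldl (fun s _ => F s) s = F^[l.length] s := by
  induction l generalizing s with
  | nil => rfl
  | cons a t ih => simp [List.foldl, ih, Function.iterate_succ_apply]

-- invariant of A's loop after k steps
theorem pvAinv (k : Nat) :
    criaStep^[k] (([] : List Int), (2 : Int), (0 : Int)) =
      ((List.range k).map pvG, (((k + 1) % 4 : Nat) : Int) + 1,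
        if 3 ≤ k % 8 ∧ k % 8 ≤ 6 then (1 : Int) else 0) := by
  induction k with
  | zero => decide
  | succ k ih =>
    rw [Function.iterate_succ_apply', ih, List.range_succ, List.map_append]
    simp only [criaStep]
    have hm1 : (k + 1) % 4 = (k % 8 + 1) % 4 := by omega
    have hm2 : (k + 1 + 1) % 4 = (k % 8 + 2) % 4 := by omega
    have hm3 : (k + 1) % 8 = (k % 8 + 1) % 8 := by omega
    rw [hm1, hm2, hm3]
    rcases (show k % 8 = 0 ∨ k % 8 = 1 ∨ k % 8 = 2 ∨ k % 8 = 3 ∨ k % 8 = 4 ∨ k % 8 = 5 ∨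
        k % 8 = 6 ∨ k % 8 = 7 from by omega) with h|h|h|h|h|h|h|h <;>
      rw [h] <;> norm_num <;> simp [pvG, h]

-- tiling the block q times is the first 8*q samples of pvG
theorem pvTile (q : Nat) :
    List.flatten (List.replicate q ([0, 0, 1, 0, 0, 0, -1, 0] : List Int)) =
      (List.range (8 * q)).map pvG := by
  induction q with
  | zero => simp
  | succ q ih =>
    rw [List.replicate_succ', List.flatten_append, ih]
    have : 8 * (q + 1) = 8 * q + 8 := by ring
    rw [this, List.range_add, List.map_append]
    congr 1
    have : List.range 8 = [0, 1, 2, 3, 4, 5, 6, 7] := by decide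
    simp only [this, List.map_cons, List.map_nil, List.flatten]
    unfold pvG
    norm_num

theorem cria_funcao_eq_alt (N periodo : Int) :
    cria_funcao N periodo = cria_funcao_alt N periodo := by
  unfold cria_funcao cria_funcao_alt
  by_cases hn : periodo * N ≤ 0
  · simp [PySem.List.pyRange_one_eq_nil (by omega), hn]
  · simp only [hn, if_false]
    rw [not_le] at hn
    set n := periodo * N with hdef
    have hq : PySem.Int.floordiv (n + 7) 8 = (n + 7) / 8 :=
      PySem.Int.floordiv_eq_ediv_of_pos (by norm_num)
    rw [hq, pvTile, pvFoldlConst, PySem.List.length_pyRange_one, pvAinv]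
    simp only [Int.sub_zero]
    rw [← List.map_take, List.take_range]
    have hmin : min n.toNat (8 * ((n + 7) / 8).toNat) = n.toNat := by omega
    simp [hmin]

-- ===== VERDICT (by name: the statement is the Claim_ definition above) =====
theorem cria_funcao_spec : Claim_equal_cria_funcao := by
  intro N periodo _
  exact cria_funcao_eq_alt N periodo
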